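-- pv_equiv track=rewrite | github.com/svcx650/2023_AdventofCode | Day_3/Day3_part2.py | find_numberAndstar_indices
-- ===== SOURCE A (Python) =====
-- def find_numberAndstar_indices(input_string):
-- 	index = 0
-- 	digit = None
-- 	# number_indices = []
-- 	number_start_indices = []
-- 	number_stop_indices = []
-- 	star_indices = []
-- 	last_number_index = None
-- 	for char in input_string:
-- 		digit = '' # this fucking guy
-- 		if char == '.':
-- 			if last_number_index not in number_stop_indices and last_number_index != None:
-- 				number_stop_indices.append(last_number_index)
-- 				last_number_index = None
-- 			index += 1
-- 			continue
-- 		try: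
-- 			digit = int(char)
-- 		except ValueError:
-- 			if last_number_index not in number_stop_indices and last_number_index != None:
-- 				number_stop_indices.append(last_number_index)
-- 				last_number_index = None
-- 			if char == '*': star_indices.append(index)
-- 		if type(digit) == int:
-- 			if last_number_index == None:
-- 				number_start_indices.append(index)
-- 				last_number_index = index
-- 			else:
-- 				last_number_index = index
-- 		index += 1
-- 	if last_number_index not in number_stop_indices and last_number_index != None: number_stop_indices.append(last_number_index)
-- 	return number_start_indices , number_stop_indices, star_indices
-- ===== SOURCE B (Python) =====
-- def find_numberAndstar_indices(input_string):
-- 	digit_flags = ['0' <= c <= '9' for c in input_string]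
-- 	number_start_indices = [i for i, (d, prev) in enumerate(zip(digit_flags, [False] + digit_flags)) if d and not prev]
-- 	number_stop_indices = [i for i, (d, nxt) in enumerate(zip(digit_flags, digit_flags[1:] + [False])) if d and not nxt]
-- 	star_indices = [i for i, c in enumerate(input_string) if c == '*']
-- 	return number_start_indices, number_stop_indices, star_indices
-- ===== Notes on version B (the rewrite author's own statement) =====
-- stated objective: simpler
-- what changed: Replaced A's char-by-char state machine (last_number_index bookkeeping with a membership test against the growing stop list on every non-digit char) by three independent comprehensions: digit-run starts/stops read off pairs of adjacent digit flags, and a separate star scan.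
import Mathlib
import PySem

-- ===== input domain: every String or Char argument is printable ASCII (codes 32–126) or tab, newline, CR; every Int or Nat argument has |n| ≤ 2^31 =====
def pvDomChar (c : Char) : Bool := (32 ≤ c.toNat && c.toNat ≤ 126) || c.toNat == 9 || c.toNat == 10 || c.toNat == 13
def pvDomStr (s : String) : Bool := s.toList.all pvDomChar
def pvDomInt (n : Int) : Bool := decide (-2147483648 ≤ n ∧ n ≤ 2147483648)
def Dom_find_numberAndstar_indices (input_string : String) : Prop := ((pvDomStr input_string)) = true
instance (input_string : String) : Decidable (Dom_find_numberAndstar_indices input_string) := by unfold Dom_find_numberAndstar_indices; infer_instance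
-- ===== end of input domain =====

-- B replaces A's char-by-char state machine (last_number_index bookkeeping with membership tests)
-- by three independent comprehensions over digit-flag pairs (run boundaries) and a star scan; objective: simpler.

-- ===== PORT A =====
-- `try: digit = int(char)` succeeds iff int(char) parses; `type(digit) == int` is then true
def pvTryInt (c : Char) : Bool := (PySem.Int.ofChars? [c]).isSome

-- the for-loop of A: state (index, number_start_indices, number_stop_indices, star_indices, last_number_index)
def pvLoopA : List Char → Int → List Int → List Int → List Int → Option Int → List Int × List Int × List Int
  | [], _, s, t, u, last =>
    -- trailing `if last_number_index not in number_stop_indices and last_number_index != None`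
    (match last with
     | some v => if v ∈ t then (s, t, u) else (s, t ++ [v], u)
     | none => (s, t, u))
  | c :: cs, i, s, t, u, last =>
    if c = '.' then
      match last with
      | some v => if v ∈ t then pvLoopA cs (i + 1) s t u (some v)
                  else pvLoopA cs (i + 1) s (t ++ [v]) u none
      | none => pvLoopA cs (i + 1) s t u none
    else if pvTryInt c then
      -- `type(digit) == int` branch
      match last with
      | none => pvLoopA cs (i + 1) (s ++ [i]) t u (some i)
      | some _ => pvLoopA cs (i + 1) s t u (some i)
    else
      -- except ValueError branch: close the run, then maybe record a star
      match last with
      | some v =>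
          if v ∈ t then pvLoopA cs (i + 1) s t (if c = '*' then u ++ [i] else u) (some v)
          else pvLoopA cs (i + 1) s (t ++ [v]) (if c = '*' then u ++ [i] else u) none
      | none => pvLoopA cs (i + 1) s t (if c = '*' then u ++ [i] else u) none

def find_numberAndstar_indices (input_string : String) : List Int × List Int × List Int :=
  pvLoopA input_string.toList 0 [] [] [] none

-- ===== PORT B =====
-- `'0' <= c <= '9'`
def pvDig (c : Char) : Bool := decide ('0' ≤ c) && decide (c ≤ '9')

def find_numberAndstar_indices_alt (input_string : String) : List Int × List Int × List Int :=
  let l := input_string.toList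
  let digit_flags := l.map pvDig
  -- digit_flags[1:] is List.drop 1 (exact for this nonnegative slice)
  let number_start_indices := (PySem.List.enumerate (digit_flags.zip (false :: digit_flags))).filterMap
      (fun p => if p.2.1 && !p.2.2 then some p.1 else none)
  let number_stop_indices := (PySem.List.enumerate (digit_flags.zip (digit_flags.drop 1 ++ [false]))).filterMap
      (fun p => if p.2.1 && !p.2.2 then some p.1 else none)
  let star_indices := (PySem.List.enumerate l).filterMap (fun p => if p.2 = '*' then some p.1 else none)
  (number_start_indices, number_stop_indices, star_indices)

-- ===== PRECONDITION & SPEC =====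
def Spec_find_numberAndstar_indices (input_string : String) (out : List Int × List Int × List Int) : Prop := out = find_numberAndstar_indices_alt input_string
instance (input_string : String) (out : List Int × List Int × List Int) : Decidable (Spec_find_numberAndstar_indices input_string out) := by unfold Spec_find_numberAndstar_indices; infer_instance

-- ===== CLAIM (what is proved, stated in full; the proofs are below) =====
def Claim_equal_find_numberAndstar_indices : Prop := ∀ (input_string : String), Dom_find_numberAndstar_indices input_string → Spec_find_numberAndstar_indices input_string (find_numberAndstar_indices input_string)

-- ===== LEMMAS AND PROOFS =====

-- reference scan: one recursive pass, p = "previous char was a digit"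
def pvScan : List Char → Int → Bool → List Int × List Int × List Int
  | [], i, p => ([], if p then [i - 1] else [], [])
  | c :: cs, i, p =>
    let r := pvScan cs (i + 1) (pvDig c)
    if pvDig c then
      (if p then r.1 else i :: r.1, r.2.1, r.2.2)
    else
      (r.1, if p then (i - 1) :: r.2.1 else r.2.1, if c = '*' then i :: r.2.2 else r.2.2)

-- on domain chars, int(char) succeeds exactly on '0'..'9'
theorem pvTryInt_eq_pvDig (c : Char) (h : pvDomChar c = true) : pvTryInt c = pvDig c := by
  have hb : c.toNat < 128 := by
    simp [pvDomChar] at h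
    omega
  have hall : ((List.range 128).all (fun n => pvTryInt (Char.ofNat n) == pvDig (Char.ofNat n))) = true := by decide
  have := List.all_eq_true.mp hall c.toNat (List.mem_range.mpr hb)
  have hc : Char.ofNat c.toNat = c := Char.ofNat_toNat c
  rw [hc] at this
  exact beq_iff_eq.mp this

theorem pvDig_ne_star (c : Char) (h : pvDig c = true) : c ≠ '*' := by
  intro he; subst he; simp [pvDig] at h

theorem pvDig_dot : pvDig '.' = false := by decide

theorem pvLoopA_eq_scan (cs : List Char) : ∀ (i : Int) (s t u : List Int) (p : Bool),
    (∀ c ∈ cs, pvDomChar c = true) → (∀ x ∈ t, x < i - 1) →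
    pvLoopA cs i s t u (if p then some (i - 1) else none)
      = (s ++ (pvScan cs i p).1, t ++ (pvScan cs i p).2.1, u ++ (pvScan cs i p).2.2) := by
  induction cs with
  | nil =>
    intro i s t u p _ ht
    cases p <;> simp [pvLoopA, pvScan]
    intro hmem
    exact absurd (ht _ hmem) (by omega)
  | cons c cs ih =>
    intro i s t u p hdom ht
    have hd : pvDomChar c = true := hdom c (List.mem_cons_self ..)
    have hdom' : ∀ x ∈ cs, pvDomChar x = true := fun x hx => hdom x (List.mem_cons_of_mem _ hx)
    have hnotmem : (i - 1) ∉ t := fun hm => absurd (ht _ hm) (by omega)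
    by_cases hdg : pvDig c = true
    · -- digit: c ≠ '.' and pvTryInt c = true
      have hne : c ≠ '.' := by intro he; subst he; simp [pvDig] at hdg
      have htr : pvTryInt c = true := (pvTryInt_eq_pvDig c hd).trans hdg
      have ht' : ∀ x ∈ t, x < (i + 1) - 1 := fun x hx => by have := ht x hx; omega
      have ihs := ih (i + 1) (s ++ [i]) t u true hdom' ht'
      have ihs' := ih (i + 1) s t u true hdom' ht'
      simp only [add_sub_cancel_right, if_true] at ihs ihs'
      cases p
      · simp only [pvLoopA, if_neg hne, htr, if_true, Bool.false_eq_true]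
        rw [ihs]
        simp [pvScan, hdg]
      · simp only [pvLoopA, if_neg hne, htr, if_true]
        rw [ihs']
        simp [pvScan, hdg]
    · -- non-digit
      have hdgf : pvDig c = false := by simpa using hdg
      have htr : pvTryInt c = false := (pvTryInt_eq_pvDig c hd).trans hdgf
      cases p
      · -- last = none
        have ih0 := ih (i + 1) s t u false hdom' (fun x hx => by have := ht x hx; omega)
        simp only [if_neg (Bool.false_ne_true)] at ih0
        by_cases hdot : c = '.'
        · subst hdot
          simp only [pvLoopA, if_true]
          rw [ih0]
          simp [pvScan, pvDig_dot]
        · simp only [pvLoopA, if_neg hdot, htr, Bool.false_eq_true, if_false]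
          by_cases hst : c = '*'
          · have ih0' := ih (i + 1) s t (u ++ [i]) false hdom' (fun x hx => by have := ht x hx; omega)
            simp only [if_neg (Bool.false_ne_true)] at ih0'
            simp only [if_pos hst]
            rw [ih0']
            subst hst; simp [pvScan, pvDig]
          · simp only [if_neg hst]
            rw [ih0]
            simp [pvScan, hdgf, hst]
      · -- last = some (i-1): close the run
        have ht' : ∀ x ∈ t ++ [i - 1], x < (i + 1) - 1 := by
          intro x hx
          rcases List.mem_append.mp hx with h | h
          · have := ht x h; omega
          · simp at h; omega
        have ih1 := ih (i + 1) s (t ++ [i - 1]) u false hdom' ht'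
        have ih1' := ih (i + 1) s (t ++ [i - 1]) (u ++ [i]) false hdom' ht'
        simp only [if_neg (Bool.false_ne_true)] at ih1 ih1'
        by_cases hdot : c = '.'
        · subst hdot
          simp only [pvLoopA, if_true, if_neg hnotmem]
          rw [ih1]
          simp [pvScan, pvDig_dot]
        · simp only [pvLoopA, if_neg hdot, htr, Bool.false_eq_true, if_false, if_true,
            if_neg hnotmem]
          by_cases hst : c = '*'
          · simp only [if_pos hst]
            rw [ih1']
            subst hst; simp [pvScan, pvDig]
          · simp only [if_neg hst]
            rw [ih1]
            simp [pvScan, hdgf, hst]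

theorem pvScan_stars (cs : List Char) : ∀ (k : Int) (p : Bool),
    (pvScan cs k p).2.2 = (PySem.List.enumerate cs k).filterMap (fun q => if q.2 = '*' then some q.1 else none) := by
  induction cs with
  | nil => intro k p; simp [pvScan, PySem.List.enumerate_nil]
  | cons c cs ih =>
    intro k p
    rw [PySem.List.enumerate_cons]
    by_cases hdg : pvDig c = true
    · simp [pvScan, hdg, pvDig_ne_star c hdg, ih]
    · simp only [Bool.not_eq_true] at hdg
      by_cases hst : c = '*'
      · subst hst; simp [pvScan, pvDig, ih]
      · simp [pvScan, hdg, hst, ih]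

theorem pvScan_starts (cs : List Char) : ∀ (k : Int) (q : Bool),
    (pvScan cs k q).1
      = (PySem.List.enumerate ((cs.map pvDig).zip (q :: cs.map pvDig)) k).filterMap
          (fun p => if p.2.1 && !p.2.2 then some p.1 else none) := by
  induction cs with
  | nil => intro k q; simp [pvScan, PySem.List.enumerate_nil]
  | cons c cs ih =>
    intro k q
    simp only [List.map_cons, List.zip_cons_cons, PySem.List.enumerate_cons]
    by_cases hdg : pvDig c = true
    · cases q <;> simp [pvScan, hdg, ih]
    · simp only [Bool.not_eq_true] at hdg
      cases q <;> simp [pvScan, hdg, ih]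

theorem pvScan_stops (cs : List Char) : ∀ (k : Int) (q : Bool),
    (pvScan cs k q).2.1
      = (if q && !((cs.map pvDig).headD false) then [k - 1] else [])
        ++ (PySem.List.enumerate ((cs.map pvDig).zip ((cs.map pvDig).drop 1 ++ [false])) k).filterMap
            (fun p => if p.2.1 && !p.2.2 then some p.1 else none) := by
  induction cs with
  | nil => intro k q; cases q <;> simp [pvScan, PySem.List.enumerate_nil]
  | cons c cs ih =>
    intro k q
    have hzip : ((c :: cs).map pvDig).zip (((c :: cs).map pvDig).drop 1 ++ [false])
        = (pvDig c, (cs.map pvDig).headD false) :: (cs.map pvDig).zip ((cs.map pvDig).drop 1 ++ [false]) := by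
      cases cs <;> simp
    rw [hzip, PySem.List.enumerate_cons]
    by_cases hdg : pvDig c = true
    · cases q <;> cases hh : (Option.map pvDig cs.head?).getD false <;> simp [pvScan, hdg, ih, hh]
    · simp only [Bool.not_eq_true] at hdg
      cases q <;> cases hh : (Option.map pvDig cs.head?).getD false <;> simp [pvScan, hdg, ih, hh]

-- ===== VERDICT (by name: the statement is the Claim_ definition above) =====
theorem find_numberAndstar_indices_spec : Claim_equal_find_numberAndstar_indices := by
  intro s hdom
  unfold Spec_find_numberAndstar_indices find_numberAndstar_indices find_numberAndstar_indices_alt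
  have hdomc : ∀ c ∈ s.toList, pvDomChar c = true := by
    have := hdom
    unfold Dom_find_numberAndstar_indices pvDomStr at this
    exact List.all_eq_true.mp this
  have h := pvLoopA_eq_scan s.toList 0 [] [] [] false hdomc (by simp)
  simp only [if_neg (Bool.false_ne_true), List.nil_append] at h
  rw [h, pvScan_stars, pvScan_starts, pvScan_stops]
  simp
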